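-- pv_equiv track=rewrite | github.com/pobiq/BOJ | 프로그래머스/2/12913. 땅따먹기/땅따먹기.py | solution
-- ===== SOURCE A (Python) =====
-- def solution(land):
--     answer = 0
--
--     rows = len(land)
--     cols = len(land[0])
--
--     matrix = [[0] * cols for _ in range(rows)]
--
--     for col in range(cols):
--         matrix[0][col] = land[0][col]
--
--     for row in range(1, rows):
--         for col in range(cols):
--             prev_max = 0
--             for index in range(cols):
--                 if col != index:
--                     prev_max = max(prev_max, matrix[row-1][index])
--             matrix[row][col] = prev_max + land[row][col]
--
--     answer = max(matrix[rows-1])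
--
--     return answer
-- ===== SOURCE B (Python) =====
-- def solution(land):
--     # Compressed DP state: only the previous row's (best, second-best, best-column)
--     # instead of the whole DP row; the exclude-one-column max is read off in O(1).
--     cols = len(land[0])
--     best = second = 0
--     bcol = -1
--     for row in land:
--         nb = ns = None
--         ncol = -1
--         for c in range(cols):
--             e = second if c == bcol else best
--             if e is None or e < 0:
--                 e = 0
--             val = row[c] + e
--             if nb is None or val > nb:
--                 nb, ns, ncol = val, nb, c
--             elif ns is None or val > ns:
--                 ns = val
--         best, second, bcol = nb, ns, ncol
--     return best
-- ===== Notes on version B (the rewrite author's own statement) =====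
-- stated objective: faster
-- what changed: B drops A's full DP matrix and inner exclude-column scan entirely: it keeps only a compressed state (best value, second-best value, best column) of the previous DP row and computes each new cell's exclude-one-column maximum in O(1) from that triple.
import Mathlib
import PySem

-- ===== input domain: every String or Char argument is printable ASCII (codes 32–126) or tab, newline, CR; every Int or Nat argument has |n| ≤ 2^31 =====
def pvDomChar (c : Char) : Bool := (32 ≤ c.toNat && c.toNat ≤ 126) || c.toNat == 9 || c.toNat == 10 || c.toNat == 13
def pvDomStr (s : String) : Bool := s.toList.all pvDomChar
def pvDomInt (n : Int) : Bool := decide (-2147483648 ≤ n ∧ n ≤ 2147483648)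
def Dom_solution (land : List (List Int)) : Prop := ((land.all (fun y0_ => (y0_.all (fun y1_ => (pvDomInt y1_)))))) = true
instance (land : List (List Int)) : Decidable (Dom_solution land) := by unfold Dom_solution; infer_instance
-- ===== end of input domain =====

-- B keeps only (best, second-best, best-column) of the previous DP row instead of A's
-- full DP matrix with a per-cell exclude-column scan (measured asymptotically faster).

-- ===== PORT A =====
-- A's inner loop: prev_max = 0; for index in range(cols): if col != index: prev_max = max(prev_max, prev[index])
def aPrevMax (prev : List Int) (cols : Nat) (col : Nat) : Int :=
  (List.range cols).foldl (fun pm index => if col ≠ index then max pm (prev.getD index 0) else pm) 0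

-- A's row loop: matrix[row][col] = prev_max + land[row][col] for each col in range(cols)
def aRow (prev : List Int) (landRow : List Int) (cols : Nat) : List Int :=
  (List.range cols).map (fun col => aPrevMax prev cols col + landRow.getD col 0)

def solution (land : List (List Int)) : Int :=
  let cols := (land.headD []).length
  let first := (List.range cols).map (fun col => (land.headD []).getD col 0)
  let last := land.tail.foldl (fun prev landRow => aRow prev landRow cols) first
  ((PySem.List.max? last (fun x => x)).getD 0)

-- ===== PORT B =====
-- B's per-cell update of the fresh top-two state (nb, ns, ncol):
--   if nb is None or val > nb: nb, ns, ncol = val, nb, c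
--   elif ns is None or val > ns: ns = val
def bCell (st : Option Int × Option Int × Int) (val : Int) (c : Int) :
    Option Int × Option Int × Int :=
  match st with
  | (none, _, _) => (some val, none, c)          -- ns := old nb = None
  | (some nb, ns, ncol) =>
    if val > nb then (some val, some nb, c)
    else
      match ns with
      | none => (some nb, some val, ncol)
      | some s => if val > s then (some nb, some val, ncol) else (some nb, some s, ncol)

-- B's inner loop over one row: e = second if c == bcol else best; clamp None/negative to 0
def bRowNext (cols : Nat) (st : Option Int × Option Int × Int) (row : List Int) :
    Option Int × Option Int × Int :=
  (List.range cols).foldl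
    (fun acc (c : Nat) =>
      let e : Int :=
        match (if (c : Int) = st.2.2 then st.2.1 else st.1) with
        | none => 0
        | some x => if x < 0 then 0 else x
      bCell acc (row.getD c 0 + e) (c : Int))
    (none, none, -1)

def solution_alt (land : List (List Int)) : Int :=
  let cols := (land.headD []).length
  let fin := land.foldl (fun st row => bRowNext cols st row) (some 0, some 0, -1)
  match fin.1 with
  | some b => b
  | none => 0

-- ===== PRECONDITION & SPEC =====
-- Pre_ excludes exactly the inputs where Python A raises: empty land or an empty first row
-- (IndexError on land[0] / ValueError on max of an empty row), and some row shorter than the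
-- first row (IndexError on land[row][col]).
def Pre_solution (land : List (List Int)) : Prop :=
  land ≠ [] ∧ (land.headD []).length ≠ 0 ∧ ∀ r ∈ land, (land.headD []).length ≤ r.length
instance (land : List (List Int)) : Decidable (Pre_solution land) := by unfold Pre_solution; infer_instance
def pvWitness_solution : List (List Int) := [[1, 2, 3], [4, 5, 6], [7, 8, 9]]

def Spec_solution (land : List (List Int)) (out : Int) : Prop := out = solution_alt land
instance (land : List (List Int)) (out : Int) : Decidable (Spec_solution land out) := by unfold Spec_solution; infer_instance

-- ===== CLAIM (what is proved, stated in full; the proofs are below) =====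
def Claim_equal_solution : Prop := ∀ (land : List (List Int)), Dom_solution land → Pre_solution land → Spec_solution land (solution land)

-- ===== LEMMAS AND PROOFS =====

-- abstract view of B's inner loop: insert the values one by one, tracking their indices
def tt : List Int → Int → (Option Int × Option Int × Int) → Option Int × Option Int × Int
  | [], _, st => st
  | v :: tl, i, st => tt tl (i + 1) (bCell st v i)

def clampO : Option Int → Int
  | none => 0
  | some x => if x < 0 then 0 else x

-- B's read-off of the exclude-column maximum from a state
def sel (st : Option Int × Option Int × Int) (c : Int) : Int :=
  clampO (if c = st.2.2 then st.2.1 else st.1)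

-- running max over a list pushed into an Option accumulator (B's ns evolution)
def omax (sb : Option Int) (l : List Int) : Option Int :=
  l.foldl (fun o v => some (match o with | none => v | some s => max s v)) sb

lemma clampO_some (x : Int) : clampO (some x) = max 0 x := by
  simp only [clampO]; omega

lemma omax_some (l : List Int) : ∀ x : Int, omax (some x) l = some (l.foldl max x) := by
  induction l with
  | nil => intro x; rfl
  | cons v tl ih => intro x; simpa [omax, List.foldl_cons] using ih (max x v)

lemma foldl_max_max (l : List Int) : ∀ a b : Int, l.foldl max (max a b) = max a (l.foldl max b) := by
  induction l with
  | nil => intro a b; rfl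
  | cons v tl ih =>
    intro a b
    simp only [List.foldl_cons]
    rw [show max (max a b) v = max a (max b v) by omega]
    exact ih a (max b v)

lemma tt_append (l1 l2 : List Int) : ∀ (i : Int) st,
    tt (l1 ++ l2) i st = tt l2 (i + l1.length) (tt l1 i st) := by
  induction l1 with
  | nil => intro i st; simp [tt]
  | cons v l1 ih =>
    intro i st
    simp only [List.cons_append, tt, List.length_cons]
    rw [ih]
    congr 1
    push_cast
    ring

lemma tt_fst (tl : List Int) : ∀ (i a : Int) (sb : Option Int) (j : Int),
    (tt tl i (some a, sb, j)).1 = some (tl.foldl max a) := by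
  induction tl with
  | nil => intro i a sb j; rfl
  | cons v tl ih =>
    intro i a sb j
    simp only [tt, List.foldl_cons, bCell]
    by_cases h : v > a
    · rw [if_pos h, ih, show max a v = v by omega]
    · rw [if_neg h]
      cases sb with
      | none => simp only []; rw [ih, show max a v = a by omega]
      | some s =>
        simp only []
        by_cases h2 : v > s
        · rw [if_pos h2, ih, show max a v = a by omega]
        · rw [if_neg h2, ih, show max a v = a by omega]

-- selecting an old non-champion index: just the clamped running maximum
lemma sel_other (tl : List Int) : ∀ (i a : Int) (sb : Option Int) (j c : Int),
    (∀ s, sb = some s → s ≤ a) → j < i → c < i → c ≠ j →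
    sel (tt tl i (some a, sb, j)) c = max 0 (tl.foldl max a) := by
  induction tl with
  | nil =>
    intro i a sb j c _ _ _ hcj
    simp only [tt, sel, List.foldl_nil, if_neg hcj, clampO_some]
  | cons v tl ih =>
    intro i a sb j c hord hj hc hcj
    simp only [tt, List.foldl_cons, bCell]
    by_cases h : v > a
    · rw [if_pos h, show max a v = v by omega]
      exact ih (i + 1) v (some a) i c (by intro s hs; cases hs; omega)
        (by omega) (by omega) (by omega)
    · rw [if_neg h, show max a v = a by omega]
      cases sb with
      | none => simp only []; exact ih (i + 1) a (some v) j c (by intro s hs; cases hs; omega) (by omega) (by omega) hcj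
      | some s =>
        simp only []
        have hs := hord s rfl
        by_cases h2 : v > s
        · rw [if_pos h2]
          exact ih (i + 1) a (some v) j c (by intro t ht; cases ht; omega) (by omega) (by omega) hcj
        · rw [if_neg h2]
          exact ih (i + 1) a (some s) j c (by intro t ht; cases ht; omega) (by omega) (by omega) hcj

-- selecting the current champion's index: the clamped second maximum
lemma sel_champ (tl : List Int) : ∀ (i a : Int) (sb : Option Int) (j : Int),
    (∀ s, sb = some s → s ≤ a) → j < i →
    sel (tt tl i (some a, sb, j)) j = clampO (omax sb tl) := by
  induction tl with
  | nil => intro i a sb j _ _; simp [tt, sel, omax]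
  | cons v tl ih =>
    intro i a sb j hord hj
    simp only [tt, bCell]
    by_cases h : v > a
    · rw [if_pos h]
      have hsel := sel_other tl (i + 1) v (some a) i j (by intro s hs; cases hs; omega)
        (by omega) (by omega) (by omega)
      rw [hsel]
      have hpush : omax sb (v :: tl) = omax (some v) tl := by
        cases sb with
        | none => rfl
        | some s =>
          have hs := hord s rfl
          simp only [omax, List.foldl_cons]
          rw [show max s v = v by omega]
      rw [hpush, omax_some, clampO_some]
    · rw [if_neg h]
      cases sb with
      | none =>
        simp only []
        rw [ih (i + 1) a (some v) j (by intro s hs; cases hs; omega) (by omega)]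
        rfl
      | some s =>
        simp only []
        have hs := hord s rfl
        by_cases h2 : v > s
        · rw [if_pos h2, ih (i + 1) a (some v) j (by intro t ht; cases ht; omega) (by omega)]
          simp only [omax, List.foldl_cons]
          rw [show max s v = v by omega]
        · rw [if_neg h2, ih (i + 1) a (some s) j (by intro t ht; cases ht; omega) (by omega)]
          simp only [omax, List.foldl_cons]
          rw [show max s v = s by omega]

-- selecting an index still to come: fold max over the rest with that element erased
lemma sel_future (tl : List Int) : ∀ (k : Nat), k < tl.length → ∀ (i a : Int) (sb : Option Int) (j : Int),
    (∀ s, sb = some s → s ≤ a) → j < i →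
    sel (tt tl i (some a, sb, j)) (i + k) = (tl.eraseIdx k).foldl max (max a (clampO sb)) := by
  induction tl with
  | nil => intro k hk; simp at hk
  | cons w tl ih =>
    intro k hk i a sb j hord hj
    have hbase : max a (clampO sb) = max 0 a := by
      cases sb with
      | none => simp only [clampO]; omega
      | some s => have := hord s rfl; rw [clampO_some]; omega
    cases k with
    | zero =>
      simp only [tt, bCell, List.eraseIdx_cons_zero, Int.natCast_zero, add_zero]
      rw [hbase, foldl_max_max]
      by_cases h : w > a
      · rw [if_pos h,
          sel_champ tl (i + 1) w (some a) i (by intro s hs; cases hs; omega) (by omega),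
          omax_some, clampO_some]
      · rw [if_neg h]
        cases sb with
        | none =>
          simp only []
          rw [sel_other tl (i + 1) a (some w) j i (by intro s hs; cases hs; omega)
            (by omega) (by omega) (by omega)]
        | some s =>
          simp only []
          have hs := hord s rfl
          by_cases h2 : w > s
          · rw [if_pos h2, sel_other tl (i + 1) a (some w) j i
              (by intro t ht; cases ht; omega) (by omega) (by omega) (by omega)]
          · rw [if_neg h2, sel_other tl (i + 1) a (some s) j i
              (by intro t ht; cases ht; omega) (by omega) (by omega) (by omega)]
    | succ k' =>
      have hk' : k' < tl.length := by simpa using hk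
      have hcast : i + ((k' + 1 : Nat) : Int) = (i + 1) + (k' : Int) := by push_cast; ring
      simp only [tt, bCell, List.eraseIdx_cons_succ, List.foldl_cons, hcast]
      by_cases h : w > a
      · rw [if_pos h, ih k' hk' (i + 1) w (some a) i (by intro s hs; cases hs; omega) (by omega)]
        congr 1
        rw [clampO_some, hbase]
        omega
      · rw [if_neg h]
        cases sb with
        | none =>
          simp only []
          rw [ih k' hk' (i + 1) a (some w) j (by intro s hs; cases hs; omega) (by omega)]
          congr 1
          rw [clampO_some]
          simp only [clampO]
          omega
        | some s =>
          simp only []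
          have hs := hord s rfl
          by_cases h2 : w > s
          · rw [if_pos h2, ih k' hk' (i + 1) a (some w) j (by intro t ht; cases ht; omega) (by omega)]
            congr 1
            rw [clampO_some, clampO_some]
            omega
          · rw [if_neg h2, ih k' hk' (i + 1) a (some s) j (by intro t ht; cases ht; omega) (by omega)]
            congr 1
            rw [clampO_some]
            omega

lemma clampO_omax_none (tl : List Int) : clampO (omax none tl) = tl.foldl max 0 := by
  cases tl with
  | nil => rfl
  | cons w tl' =>
    show clampO (omax (some w) tl') = tl'.foldl max (max 0 w)
    rw [omax_some, clampO_some, foldl_max_max]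

-- the final read-off from a whole-list state: fold max over the list with index k erased
lemma sel_whole (v : Int) (tl : List Int) (k : Nat) (hk : k < (v :: tl).length) :
    sel (tt (v :: tl) 0 (none, none, -1)) (k : Int) = ((v :: tl).eraseIdx k).foldl max 0 := by
  show sel (tt tl 1 (some v, none, 0)) (k : Int) = ((v :: tl).eraseIdx k).foldl max 0
  cases k with
  | zero =>
    rw [show ((0 : Nat) : Int) = 0 by rfl,
      sel_champ tl 1 v none 0 (by intro s hs; cases hs) (by omega),
      clampO_omax_none]
    rfl
  | succ k' =>
    have hk' : k' < tl.length := by simpa using hk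
    have hcast : ((k' + 1 : Nat) : Int) = 1 + (k' : Int) := by push_cast; ring
    rw [hcast, sel_future tl k' hk' 1 v none 0 (by intro s hs; cases hs) (by omega)]
    simp only [List.eraseIdx_cons_succ, List.foldl_cons, clampO]
    rw [show max v 0 = max 0 v by omega]

-- B's inner loop is tt of the list of candidate values
lemma bRowNext_eq_tt (cols : Nat) (st : Option Int × Option Int × Int) (row : List Int) :
    bRowNext cols st row
      = tt ((List.range cols).map (fun c => row.getD c 0 + sel st (c : Int))) 0 (none, none, -1) := by
  unfold bRowNext
  induction cols with
  | zero => rfl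
  | succ n ih =>
    rw [List.range_succ, List.foldl_append, List.map_append, tt_append, ih]
    simp only [List.foldl_cons, List.foldl_nil, List.map_cons, List.map_nil, tt,
      List.length_map, List.length_range, zero_add]
    rfl

-- A-side: the full-index running max equals fold max over the list
lemma foldl_range_max (tl : List Int) : ∀ (acc : Int),
    (List.range tl.length).foldl (fun pm i => max pm (tl.getD i 0)) acc = tl.foldl max acc := by
  induction tl with
  | nil => intro acc; simp
  | cons v tl ih =>
    intro acc
    simp only [List.length_cons, List.range_succ_eq_map, List.foldl_cons, List.foldl_map,
      List.getD_cons_zero, List.getD_cons_succ]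
    rw [show max acc v = max v acc by omega]
    exact ih (max v acc) |>.trans (by rw [show max v acc = max acc v by omega])

-- A-side: the skip-index fold equals fold max over the list with index c erased
lemma aFold_eq (prev : List Int) : ∀ (c : Nat) (acc : Int),
    (List.range prev.length).foldl (fun pm i => if c ≠ i then max pm (prev.getD i 0) else pm) acc
    = (prev.eraseIdx c).foldl max acc := by
  induction prev with
  | nil => intro c acc; simp
  | cons v tl ih =>
    intro c acc
    rw [List.length_cons, List.range_succ_eq_map, List.foldl_cons, List.foldl_map]
    cases c with
    | zero =>
      simp only [ne_eq, not_true_eq_false, if_false, List.eraseIdx_cons_zero,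
        List.getD_cons_succ]
      exact (PySem.List.foldl_congr_mem _ _ _ _ (by intro pm i hi; simp)).trans
        (foldl_range_max tl acc)
    | succ c =>
      simp only [ne_eq, Nat.succ_ne_zero, not_false_eq_true, if_true, List.eraseIdx_cons_succ,
        List.foldl_cons, List.getD_cons_zero, List.getD_cons_succ]
      exact (PySem.List.foldl_congr_mem _ _
          (fun pm i => if c ≠ i then max pm (tl.getD i 0) else pm) _
          (by intro pm i hi; simp)).trans (ih c (max acc v))

-- one row step: B's compressed state of the previous DP row yields A's next DP row
lemma row_step (prev row : List Int) (hne : prev ≠ []) :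
    bRowNext prev.length (tt prev 0 (none, none, -1)) row = tt (aRow prev row prev.length) 0 (none, none, -1) := by
  rw [bRowNext_eq_tt]
  congr 1
  unfold aRow
  apply List.map_congr_left
  intro c hc
  have hc' : c < prev.length := List.mem_range.mp hc
  obtain ⟨v, tl, rfl⟩ : ∃ v tl, prev = v :: tl := by
    cases prev with
    | nil => exact absurd rfl hne
    | cons v tl => exact ⟨v, tl, rfl⟩
  rw [sel_whole v tl c hc']
  unfold aPrevMax
  rw [aFold_eq (v :: tl) c 0]
  ring

lemma aRow_length (prev landRow : List Int) (cols : Nat) : (aRow prev landRow cols).length = cols := by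
  simp [aRow]

lemma foldl_aRow_length (rows : List (List Int)) : ∀ (p : List Int) (cols : Nat), p.length = cols →
    (rows.foldl (fun prev landRow => aRow prev landRow cols) p).length = cols := by
  induction rows with
  | nil => intro p cols hp; simpa
  | cons r rs ih => intro p cols hp; exact ih (aRow p r cols) cols (aRow_length p r cols)

theorem solution_spec : Claim_equal_solution := by
  intro land _hdom hpre
  obtain ⟨hne, hcols, _⟩ := hpre
  obtain ⟨l0, rest, rfl⟩ : ∃ l0 rest, land = l0 :: rest := by
    cases land with
    | nil => exact absurd rfl hne
    | cons l0 rest => exact ⟨l0, rest, rfl⟩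
  simp only [List.headD_cons] at hcols
  unfold Spec_solution solution solution_alt
  simp only [List.headD_cons, List.tail_cons, List.foldl_cons]
  set cols := l0.length with hc
  set first := (List.range cols).map (fun col => l0.getD col 0) with hfirst
  have hfirstlen : first.length = cols := by simp [hfirst]
  -- B's first row builds the compressed state of A's first DP row
  have hrow0 : bRowNext cols (some 0, some 0, -1) l0 = tt first 0 (none, none, -1) := by
    rw [bRowNext_eq_tt]
    congr 1
    rw [hfirst]
    apply List.map_congr_left
    intro c _
    have : sel (some 0, some 0, -1) (c : Int) = 0 := by
      simp only [sel]
      rw [if_neg (by omega)]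
      rfl
    rw [this, add_zero]
  -- invariant over the remaining rows
  have inv : ∀ (rows : List (List Int)) (p : List Int), p.length = cols → p ≠ [] →
      rows.foldl (fun st row => bRowNext cols st row) (tt p 0 (none, none, -1))
        = tt (rows.foldl (fun prev landRow => aRow prev landRow cols) p) 0 (none, none, -1) := by
    intro rows
    induction rows with
    | nil => intro p _ _; rfl
    | cons r rows ih =>
      intro p hp hpne
      simp only [List.foldl_cons]
      rw [show bRowNext cols (tt p 0 (none, none, -1)) r = tt (aRow p r cols) 0 (none, none, -1) by
        rw [← hp]; exact row_step p r hpne]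
      exact ih (aRow p r cols) (aRow_length p r cols) (by
        intro habs
        have := aRow_length p r cols
        rw [habs] at this
        simp at this
        omega)
  have hfne : first ≠ [] := by
    intro habs
    rw [habs] at hfirstlen
    simp at hfirstlen
    omega
  rw [hrow0, inv rest first hfirstlen hfne]
  set last := rest.foldl (fun prev landRow => aRow prev landRow cols) first with hlast
  have hlastlen : last.length = cols := foldl_aRow_length rest first cols hfirstlen
  obtain ⟨v, tl, hvt⟩ : ∃ v tl, last = v :: tl := by
    cases hl : last with
    | nil => rw [hl] at hlastlen; simp at hlastlen; omega
    | cons v tl => exact ⟨v, tl, rfl⟩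
  rw [hvt, PySem.List.max?_id_cons]
  show tl.foldl max v = _
  rw [show tt (v :: tl) 0 (none, none, -1) = tt tl 1 (some v, none, 0) from rfl, tt_fst]
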